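-- pv_equiv track=rewrite | github.com/pySRURGS/pyGOURGS | pyGOURGS/pyGOURGS.py | base_m_to_decimal
-- ===== SOURCE A (Python) =====
-- def base_m_to_decimal(v, m):
--     """
--     A function that converts a base m number to decimal base number
--
--     Parameters
--     ----------
--     v: int (or list of int when the output of 'decimal_to_base_m' is considered)
--         The integer in base m to convert
--
--     m: int
--         The base of the number system from which we are converting
--
--     Returns
--     -------
--     result: int
--     """
--     if m > 10 and type(v) is int:
--         msg = "Cannot handle m > 10 and type(v) is int. Input v as list"
--         raise Exception(msg)
--     if m == 1:
--         if type(v) is int: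
--             v = str(v)
--         elif type(v) is list:
--             v = [str(i) for i in v]
--             v = ''.join(v)
--         else:
--             raise Exception("Invalid type of v")
--         result = 0
--         for i in v:
--             result = result + int(i)
--     elif m >= 2:
--         if type(v) is int:
--             number = [int(i) for i in str(v)]
--         elif type(v) is list:
--             number = v
--         else:
--             raise Exception("Invalid type of v")
--         result = 0
--         reversed_number = list(reversed(number))
--         for i in range(0,len(number)):
--             result = result + reversed_number[i] * m**i
--     else:
--         raise Exception("Invalid m")
--     return result
-- ===== SOURCE B (Python) =====
-- def base_m_to_decimal(v, m):
--     """Horner's method: one pass, result = result*m + digit."""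
--     if m < 1:
--         raise Exception("Invalid m")
--     digits = [int(c) for c in str(v)] if type(v) is int else v
--     result = 0
--     for d in digits:
--         result = result * m + d
--     return result
-- ===== Notes on version B (the rewrite author's own statement) =====
-- stated objective: alternative
-- what changed: Replaces the reversed-list loop that recomputes m**i at every position (and the m==1 string-concatenation digit walk) with a single Horner pass result = result*m + digit.
-- outside the precondition, e.g. on base_m_to_decimal([12], 1): A returns 3, B returns 12; on base_m_to_decimal([1, 2], 0): A raises Exception, B raises Exception
import Mathlib
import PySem

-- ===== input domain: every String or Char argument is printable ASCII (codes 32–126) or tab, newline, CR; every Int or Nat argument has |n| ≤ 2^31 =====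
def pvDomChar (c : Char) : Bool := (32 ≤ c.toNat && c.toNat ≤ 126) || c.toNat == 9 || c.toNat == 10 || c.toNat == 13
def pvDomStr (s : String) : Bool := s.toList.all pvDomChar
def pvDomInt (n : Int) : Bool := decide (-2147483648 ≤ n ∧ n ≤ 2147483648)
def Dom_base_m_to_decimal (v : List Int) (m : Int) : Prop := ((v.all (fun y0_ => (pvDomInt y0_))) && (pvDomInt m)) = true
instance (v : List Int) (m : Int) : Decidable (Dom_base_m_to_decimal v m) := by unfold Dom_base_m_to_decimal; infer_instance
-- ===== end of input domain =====

-- B replaces A's per-position m**i loop (and the m==1 string-concatenation digit walk)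
-- with a single Horner pass result = result*m + digit.

-- ===== PORT A =====
-- Literal port of A for v : List Int (the 'type(v) is int' branches are dead for a list
-- argument).  m == 1: join the decimal strings of the elements and sum int(ch) per char
-- (int('-') etc. raises ValueError -> excluded by Pre_).  m >= 2: sum reversed[i]*m**i
-- over range(0, len(v)).  m <= 0 raises -> excluded by Pre_.
def base_m_to_decimal (v : List Int) (m : Int) : Int :=
  if m == 1 then
    -- v = [str(i) for i in v]; v = ''.join(v)  (ported at the List Char level, exact)
    let chars : List Char := (v.map PySem.Int.toChars).foldl (fun acc x => acc ++ x) []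
    -- for i in v: result = result + int(i)   (int(ch); none = ValueError, outside Pre_)
    chars.foldl (fun r c => r + (PySem.Int.ofChars? [c]).getD 0) 0
  else if m ≥ 2 then
    let reversed_number := v.reverse
    (PySem.List.pyRange 0 v.length 1).foldl
      (fun r i => r + (PySem.List.pyGetD reversed_number i 0) * m ^ i.toNat) 0
  else
    0  -- Python raises Exception("Invalid m") here; outside Pre_

-- ===== PORT B =====
def base_m_to_decimal_alt (v : List Int) (m : Int) : Int :=
  if m < 1 then 0  -- Python raises here; outside Pre_
  else v.foldl (fun r d => r * m + d) 0

-- ===== PRECONDITION & SPEC =====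
-- Pre_ excludes m <= 0 (A raises "Invalid m") and, for m == 1, lists with an element
-- outside 0..9: there A raises on negatives (int('-') is a ValueError) and on multi-digit
-- elements returns the sum of their decimal digits, an artefact of joining decimal
-- strings that are not valid unary digits, which B does not reproduce.
def Pre_base_m_to_decimal (v : List Int) (m : Int) : Prop :=
  2 ≤ m ∨ (m = 1 ∧ ∀ d ∈ v, 0 ≤ d ∧ d ≤ 9)
instance (v : List Int) (m : Int) : Decidable (Pre_base_m_to_decimal v m) := by
  unfold Pre_base_m_to_decimal; infer_instance

def pvWitness_base_m_to_decimal : List Int × Int := ([1, 0, 1], 2)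

def Spec_base_m_to_decimal (v : List Int) (m : Int) (out : Int) : Prop :=
  out = base_m_to_decimal_alt v m
instance (v : List Int) (m : Int) (out : Int) : Decidable (Spec_base_m_to_decimal v m out) := by
  unfold Spec_base_m_to_decimal; infer_instance

-- ===== CLAIM (what is proved, stated in full; the proofs are below) =====
def Claim_equal_base_m_to_decimal : Prop :=
  ∀ (v : List Int) (m : Int), Dom_base_m_to_decimal v m → Pre_base_m_to_decimal v m →
    Spec_base_m_to_decimal v m (base_m_to_decimal v m)

-- ===== LEMMAS AND PROOFS =====

-- str(d) of a single decimal digit d is one char, and int of that char is d again.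
theorem pv_digit_chars (d : Int) (h0 : 0 ≤ d) (h9 : d ≤ 9) :
    PySem.Int.toChars d = [Char.ofNat (48 + d.toNat)] ∧
      (PySem.Int.ofChars? [Char.ofNat (48 + d.toNat)]).getD 0 = d := by
  interval_cases d <;> exact ⟨by decide, by decide⟩

-- The m == 1 char walk over the joined digit strings is just summation of the digits.
theorem pv_m1_sum (v : List Int) (h : ∀ d ∈ v, 0 ≤ d ∧ d ≤ 9) (acc : Int) :
    ((v.map PySem.Int.toChars).flatten).foldl
        (fun r c => r + (PySem.Int.ofChars? [c]).getD 0) acc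
      = v.foldl (fun r d => r + d) acc := by
  induction v generalizing acc with
  | nil => rfl
  | cons d t ih =>
      obtain ⟨hc, hv⟩ := pv_digit_chars d (h d (List.mem_cons_self)).1 (h d (List.mem_cons_self)).2
      simp only [List.map_cons, List.flatten_cons, hc, List.foldl_append, List.foldl_cons,
        List.foldl_nil, hv]
      exact ih (fun x hx => h x (List.mem_cons_of_mem _ hx)) _

-- Generalized Horner accumulator.
theorem pv_horner_acc (l : List Int) (m a : Int) :
    l.foldl (fun r d => r * m + d) a
      = a * m ^ l.length + l.foldl (fun r d => r * m + d) 0 := by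
  induction l generalizing a with
  | nil => simp
  | cons x t ih =>
      simp only [List.foldl_cons, List.length_cons]
      rw [ih (a * m + x), ih (0 * m + x)]
      ring

-- A's positional sum over range(0, len w) equals the Horner fold of w.reverse.
theorem pv_range_sum (w : List Int) (m : Int) :
    (PySem.List.pyRange 0 (w.length : Int) 1).foldl
        (fun r i => r + (PySem.List.pyGetD w i 0) * m ^ i.toNat) 0
      = w.reverse.foldl (fun r d => r * m + d) 0 := by
  induction w using List.reverseRecOn with
  | nil => simp [PySem.List.pyRange]
  | append_singleton w' d ih =>
      have hlen : ((w' ++ [d]).length : Int) = (w'.length : Int) + 1 := by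
        simp
      rw [hlen, PySem.List.pyRange_one_succ_right (by positivity), List.foldl_append]
      have hcongr : (PySem.List.pyRange 0 (w'.length : Int) 1).foldl
          (fun r i => r + (PySem.List.pyGetD (w' ++ [d]) i 0) * m ^ i.toNat) 0
          = (PySem.List.pyRange 0 (w'.length : Int) 1).foldl
          (fun r i => r + (PySem.List.pyGetD w' i 0) * m ^ i.toNat) 0 := by
        apply PySem.List.foldl_congr_mem
        intro r i hi
        have hmem := (PySem.List.mem_pyRange_one).1 hi
        have : PySem.List.pyGetD (w' ++ [d]) i 0 = PySem.List.pyGetD w' i 0 := by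
          obtain ⟨k, rfl⟩ : ∃ k : Nat, i = (k : Int) :=
            ⟨i.toNat, (Int.toNat_of_nonneg hmem.1).symm⟩
          have hk : k < w'.length := by exact_mod_cast hmem.2
          rw [PySem.List.pyGetD_natCast, PySem.List.pyGetD_natCast,
            List.getD_eq_getElem?_getD, List.getD_eq_getElem?_getD,
            List.getElem?_append_left hk]
        rw [this]
      rw [hcongr, ih]
      simp only [List.foldl_cons, List.foldl_nil, List.reverse_append,
        List.reverse_singleton, List.singleton_append, List.foldl_cons]
      rw [pv_horner_acc w'.reverse m (0 * m + d)]
      have : PySem.List.pyGetD (w' ++ [d]) (w'.length : Int) 0 = d := by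
        rw [PySem.List.pyGetD_natCast, List.getD_eq_getElem?_getD,
          List.getElem?_append_right (le_refl _)]
        simp
      rw [this]
      have : (0 : Int) ≤ (w'.length : Int) := by positivity
      simp only [Int.toNat_natCast, List.length_reverse]
      ring

-- ===== VERDICT (by name: the statement is the Claim_ definition above) =====
theorem base_m_to_decimal_spec : Claim_equal_base_m_to_decimal := by
  intro v m _ hpre
  unfold Spec_base_m_to_decimal base_m_to_decimal base_m_to_decimal_alt
  rcases hpre with h2 | ⟨hm1, hdig⟩
  · have hne1 : ¬ (m == 1) = true := by simp; omega
    have hge2 : m ≥ 2 := h2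
    have hnlt : ¬ m < 1 := by omega
    simp only [hne1, if_pos hge2, if_neg hnlt]
    have := pv_range_sum v.reverse m
    simpa [PySem.List.len] using this
  · subst hm1
    simp only [if_neg (by omega : ¬ (1:Int) < 1), if_pos (by simp : ((1:Int) == 1) = true)]
    rw [PySem.List.foldl_append_eq_flatten, List.nil_append, pv_m1_sum v hdig 0]
    have hf : (fun (r d : Int) => r * 1 + d) = fun r d => r + d := by funext r d; ring
    rw [hf]
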